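-- pv_equiv track=rewrite | github.com/cceh/zenodup | zenodup/bundles/parsing.py | get_abstract_file
-- ===== SOURCE A (Python) =====
-- def get_abstract_file(publication_names: dict, comparable_files: dict, index : int) -> str:
--     """Assigns file to abstract and returns filename
--
--     Parameters
--     ----------
--     publication_names: dict
--         Dictionary with all possible names for one abstract
--     comparable_files: dict
--         Dictionary with modified filenames as keys and filenames as values
--     index: int
--         Index of metadata element to be assigned. If no file could be assigned to metadata by name
--         comparison, the file with given index in list will be matched with metadata element.
--
--     Returns
--     -------
--     abstract_file: str
--         Returns filename of matched file
--     """
--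
--     # find matching filename
--     for elem in publication_names:
--         if any(possible_name.find(name) != -1 for possible_name in publication_names.get(elem) for name in
--                comparable_files.keys()):
--             for possible_name in publication_names.get(elem):
--                 for name in comparable_files.keys():
--                     if possible_name.find(name) != -1:
--                         abstract_file = comparable_files.get(name)
--         elif any(possible_name.find(name[:-1]) != -1 for possible_name in publication_names.get(elem) for name in
--                  comparable_files.keys()):
--             for possible_name in publication_names.get(elem):
--                 for name in comparable_files.keys():
--                     if possible_name.find(name[:-1]) != -1:
--                         abstract_file = comparable_files.get(name)
--     # if matching filename has been found return file
--     try: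
--         return abstract_file
--     # else return file with metadata elements index
--     except UnboundLocalError:
--         return list(comparable_files.values())[index]
-- ===== SOURCE B (Python) =====
-- def get_abstract_file(publication_names: dict, comparable_files: dict, index: int) -> str:
--     # Back-to-front search with early return: the first hit in reverse
--     # iteration order is exactly the last assignment A's last-wins loops make.
--     keys = list(comparable_files)
--     for elem in reversed(list(publication_names)):
--         names = publication_names[elem]
--         for chop in (False, True):
--             for possible_name in reversed(names):
--                 for name in reversed(keys):
--                     probe = name[:-1] if chop else name
--                     if probe in possible_name:
--                         return comparable_files[name]
--     return list(comparable_files.values())[index]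
-- ===== Notes on version B (the rewrite author's own statement) =====
-- stated objective: faster
-- what changed: A runs a nested any() precheck and then re-runs the same nested loops letting the last match win, per branch and per element, always scanning everything; B makes a single back-to-front pass (elements, then full/chopped key, then names and keys in reverse) and returns at the first hit, which is exactly A's last assignment, dropping the precheck entirely.
import Mathlib
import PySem

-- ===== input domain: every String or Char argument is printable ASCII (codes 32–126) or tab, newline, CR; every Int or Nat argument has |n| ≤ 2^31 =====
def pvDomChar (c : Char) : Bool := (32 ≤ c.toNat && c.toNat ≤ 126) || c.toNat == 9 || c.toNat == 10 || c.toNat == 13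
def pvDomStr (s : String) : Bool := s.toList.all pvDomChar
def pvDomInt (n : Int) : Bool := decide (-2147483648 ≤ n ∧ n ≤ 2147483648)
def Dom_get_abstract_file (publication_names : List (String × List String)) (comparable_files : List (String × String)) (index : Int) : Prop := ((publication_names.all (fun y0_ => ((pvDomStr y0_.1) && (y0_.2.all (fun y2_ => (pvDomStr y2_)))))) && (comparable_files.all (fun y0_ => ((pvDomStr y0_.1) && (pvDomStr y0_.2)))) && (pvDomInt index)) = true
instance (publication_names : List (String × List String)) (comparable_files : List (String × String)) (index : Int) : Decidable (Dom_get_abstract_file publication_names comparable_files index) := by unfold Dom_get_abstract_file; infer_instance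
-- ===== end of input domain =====

-- B replaces A's any()-precheck plus last-wins assignment loops by a single back-to-front
-- search with early return (objective: simpler); equivalence is about the return value.

-- ===== PORT A =====
def get_abstract_file (publication_names : List (String × List String)) (comparable_files : List (String × String)) (index : Int) : String :=
  let pnD := PySem.Dict.mk publication_names
  let cfD := PySem.Dict.mk comparable_files
  -- 'abstract_file' is the Option accumulator: none = still unbound
  let res : Option String := pnD.keys.foldl (fun acc elem =>
    let names := pnD.getD elem []
    if names.any (fun pn => cfD.keys.any (fun name => PySem.Str.find pn name ≠ -1)) then
      names.foldl (fun acc pn => cfD.keys.foldl (fun acc name =>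
        if PySem.Str.find pn name ≠ -1 then some (cfD.getD name "") else acc) acc) acc
    else if names.any (fun pn => cfD.keys.any (fun name =>
        PySem.Str.find pn (PySem.Str.slice name none (some (-1))) ≠ -1)) then
      names.foldl (fun acc pn => cfD.keys.foldl (fun acc name =>
        if PySem.Str.find pn (PySem.Str.slice name none (some (-1))) ≠ -1 then some (cfD.getD name "") else acc) acc) acc
    else acc) none
  match res with
  | some f => f
  | none => (PySem.List.pyGet? cfD.values index).getD ""   -- none = IndexError, excluded by Pre_

-- ===== PORT B =====
def get_abstract_file_alt (publication_names : List (String × List String)) (comparable_files : List (String × String)) (index : Int) : String :=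
  let pnD := PySem.Dict.mk publication_names
  let cfD := PySem.Dict.mk comparable_files
  let keys := cfD.keys
  let res : Option String :=
    pnD.keys.reverse.findSome? (fun elem =>
      let names := pnD.getD elem []
      [false, true].findSome? (fun chop =>
        names.reverse.findSome? (fun possible_name =>
          keys.reverse.findSome? (fun name =>
            if PySem.Str.isIn (if chop then PySem.Str.slice name none (some (-1)) else name) possible_name
            then some (cfD.getD name "") else none))))
  match res with
  | some f => f
  | none => (PySem.List.pyGet? cfD.values index).getD ""   -- none = IndexError, excluded by Pre_

-- ===== PRECONDITION & SPEC =====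
-- Pre_ excludes exactly the inputs on which A raises IndexError: no name comparison hits
-- (neither a full key nor a key with its last character dropped occurs in any possible name)
-- and 'index' is out of range for the file list.
def Pre_get_abstract_file (publication_names : List (String × List String)) (comparable_files : List (String × String)) (index : Int) : Prop :=
  (∃ p ∈ publication_names, ∃ s ∈ (PySem.Dict.mk publication_names).getD p.1 [], ∃ q ∈ comparable_files,
      (PySem.Str.find s q.1 ≠ -1 ∨ PySem.Str.find s (PySem.Str.slice q.1 none (some (-1))) ≠ -1))
  ∨ (-(comparable_files.length : Int) ≤ index ∧ index < comparable_files.length)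
instance (publication_names : List (String × List String)) (comparable_files : List (String × String)) (index : Int) : Decidable (Pre_get_abstract_file publication_names comparable_files index) := by unfold Pre_get_abstract_file; infer_instance
def pvWitness_get_abstract_file : (List (String × List String)) × (List (String × String)) × Int :=
  ([("e1", ["paper_one", "one"]), ("e2", ["talk_two"])], [("one", "001.xml"), ("two", "002.xml")], 0)

def Spec_get_abstract_file (publication_names : List (String × List String)) (comparable_files : List (String × String)) (index : Int) (out : String) : Prop := out = get_abstract_file_alt publication_names comparable_files index
instance (publication_names : List (String × List String)) (comparable_files : List (String × String)) (index : Int) (out : String) : Decidable (Spec_get_abstract_file publication_names comparable_files index out) := by unfold Spec_get_abstract_file; infer_instance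

-- ===== CLAIM (what is proved, stated in full; the proofs are below) =====
def Claim_equal_get_abstract_file : Prop := ∀ (publication_names : List (String × List String)) (comparable_files : List (String × String)) (index : Int), Dom_get_abstract_file publication_names comparable_files index → Pre_get_abstract_file publication_names comparable_files index → Spec_get_abstract_file publication_names comparable_files index (get_abstract_file publication_names comparable_files index)

-- ===== LEMMAS AND PROOFS =====

-- A last-wins assignment loop equals the first hit of the reversed list.
theorem pv_foldl_if_eq_rev_findSome {α β : Type} (p : α → Prop) [DecidablePred p] (g : α → β) (l : List α) (acc : Option β) :
    l.foldl (fun a x => if p x then some (g x) else a) acc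
      = (l.reverse.findSome? (fun x => if p x then some (g x) else none)).or acc := by
  induction l generalizing acc with
  | nil => simp
  | cons x l ih =>
      simp only [List.foldl_cons, ih, List.reverse_cons, List.findSome?_append]
      cases h : l.reverse.findSome? (fun x => if p x then some (g x) else none) with
      | some v => simp [Option.or]
      | none => by_cases hp : p x <;> simp [hp, Option.or]

-- Same shape one level up: each step tries its own option, keeping the old value otherwise.
theorem pv_foldl_or_eq_rev_findSome {α β : Type} (m : α → Option β) (l : List α) (acc : Option β) :
    l.foldl (fun a x => (m x).or a) acc = (l.reverse.findSome? m).or acc := by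
  induction l generalizing acc with
  | nil => simp
  | cons x l ih =>
      simp only [List.foldl_cons, ih, List.reverse_cons, List.findSome?_append]
      cases h : l.reverse.findSome? m with
      | some v => simp [Option.or]
      | none => cases hm : m x <;> simp [hm, Option.or]

-- A's nested any() precheck succeeds exactly when the reversed nested search finds a hit.
theorem pv_nested_any {α β γ : Type} (p : α → β → Prop) [∀ a b, Decidable (p a b)] (g : β → γ) (l : List α) (K : List β) :
    (l.any fun x => K.any fun y => decide (p x y))
      = (l.reverse.findSome? (fun x => K.reverse.findSome? (fun y => if p x y then some (g y) else none))).isSome := by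
  rw [Bool.eq_iff_iff]
  simp only [List.any_eq_true, decide_eq_true_eq, Option.isSome_iff_ne_none, ne_eq,
    List.findSome?_eq_none_iff, List.mem_reverse, ite_eq_right_iff, reduceCtorEq, imp_false]
  push Not
  tauto

theorem pv_findSome_pair {β : Type} (f : Bool → Option β) :
    [false, true].findSome? f = (f false).or (f true) := by
  cases h : f false <;> cases h2 : f true <;> simp [h, h2, Option.or]

-- 'sub in s' is 's.find(sub) != -1'.
theorem pv_isIn_eq_decide (sub s : String) :
    PySem.Str.isIn sub s = decide (PySem.Str.find s sub ≠ -1) := by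
  rw [Bool.eq_iff_iff]
  simp [PySem.Chars.isIn_iff_infix, ← PySem.Chars.find_ne_neg_one_iff]

-- Core equivalence of the two search loops, over abstract key lists and lookup functions.
theorem pv_core (P K : List String) (N : String → List String) (v : String → String) :
    P.foldl (fun acc elem =>
      if (N elem).any (fun pnm => K.any (fun nm => PySem.Str.find pnm nm ≠ -1)) then
        (N elem).foldl (fun acc pnm => K.foldl (fun acc nm =>
          if PySem.Str.find pnm nm ≠ -1 then some (v nm) else acc) acc) acc
      else if (N elem).any (fun pnm => K.any (fun nm => PySem.Str.find pnm (PySem.Str.slice nm none (some (-1))) ≠ -1)) then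
        (N elem).foldl (fun acc pnm => K.foldl (fun acc nm =>
          if PySem.Str.find pnm (PySem.Str.slice nm none (some (-1))) ≠ -1 then some (v nm) else acc) acc) acc
      else acc) none
    = P.reverse.findSome? (fun elem =>
        [false, true].findSome? (fun chop =>
          (N elem).reverse.findSome? (fun pnm =>
            K.reverse.findSome? (fun nm =>
              if PySem.Str.isIn (if chop then PySem.Str.slice nm none (some (-1)) else nm) pnm
              then some (v nm) else none)))) := by
  have hstep : ∀ (acc : Option String) (elem : String),
      (if (N elem).any (fun pnm => K.any (fun nm => PySem.Str.find pnm nm ≠ -1)) then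
        (N elem).foldl (fun acc pnm => K.foldl (fun acc nm =>
          if PySem.Str.find pnm nm ≠ -1 then some (v nm) else acc) acc) acc
      else if (N elem).any (fun pnm => K.any (fun nm => PySem.Str.find pnm (PySem.Str.slice nm none (some (-1))) ≠ -1)) then
        (N elem).foldl (fun acc pnm => K.foldl (fun acc nm =>
          if PySem.Str.find pnm (PySem.Str.slice nm none (some (-1))) ≠ -1 then some (v nm) else acc) acc) acc
      else acc)
      = (((N elem).reverse.findSome? (fun pnm => K.reverse.findSome? (fun nm =>
            if PySem.Str.find pnm nm ≠ -1 then some (v nm) else none))).or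
         ((N elem).reverse.findSome? (fun pnm => K.reverse.findSome? (fun nm =>
            if PySem.Str.find pnm (PySem.Str.slice nm none (some (-1))) ≠ -1 then some (v nm) else none)))).or acc := by
    intro acc elem
    have hany1 := pv_nested_any (fun pnm nm => PySem.Str.find pnm nm ≠ -1) v (N elem) K
    have hany2 := pv_nested_any (fun pnm nm => PySem.Str.find pnm (PySem.Str.slice nm none (some (-1))) ≠ -1) v (N elem) K
    simp only [pv_foldl_if_eq_rev_findSome, pv_foldl_or_eq_rev_findSome, hany1, hany2]
    cases hFA : (N elem).reverse.findSome? (fun pnm => K.reverse.findSome? (fun nm =>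
        if PySem.Str.find pnm nm ≠ -1 then some (v nm) else none)) with
    | some w => simp only [hFA, Option.isSome_some, if_true, Option.some_or]
    | none =>
        cases hFP : (N elem).reverse.findSome? (fun pnm => K.reverse.findSome? (fun nm =>
            if PySem.Str.find pnm (PySem.Str.slice nm none (some (-1))) ≠ -1 then some (v nm) else none)) with
        | some w => simp [hFA, hFP, Option.or]
        | none => simp [hFA, hFP, Option.or]
  rw [List.foldl_ext _ _ none (fun a b _ => hstep a b), pv_foldl_or_eq_rev_findSome,
    Option.or_none]
  congr 1
  funext elem
  rw [pv_findSome_pair]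
  simp only [Bool.false_eq_true, if_false, if_true, pv_isIn_eq_decide, decide_not,
    Bool.not_eq_true', decide_eq_false_iff_not]

theorem pv_res (pn : List (String × List String)) (cf : List (String × String)) (idx : Int) :
    get_abstract_file pn cf idx = get_abstract_file_alt pn cf idx := by
  unfold get_abstract_file get_abstract_file_alt
  have h := pv_core (PySem.Dict.mk pn).keys (PySem.Dict.mk cf).keys
      (fun e => (PySem.Dict.mk pn).getD e []) (fun nm => (PySem.Dict.mk cf).getD nm "")
  simp only at h ⊢
  rw [h]

-- ===== VERDICT (by name: the statement is the Claim_ definition above) =====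
theorem get_abstract_file_spec : Claim_equal_get_abstract_file := by
  intro publication_names comparable_files index _ _
  unfold Spec_get_abstract_file
  exact pv_res publication_names comparable_files index
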